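-- pv_equiv track=rewrite | github.com/Luminosite/algorithm_practice | codes_practice/l00474.py | count01
-- ===== SOURCE A (Python) =====
-- def count01(str_val):
--     zeros = 0
--     ones = 0
--     for c in str_val:
--         if c == '0':
--             zeros += 1
--         else:
--             ones += 1
--     return zeros, ones
-- ===== SOURCE B (Python) =====
-- def count01(str_val):
--     # Divide and conquer: split in half, count each half recursively, add the pairs.
--     if len(str_val) <= 1:
--         if not str_val:
--             return 0, 0
--         return (1, 0) if str_val == '0' else (0, 1)
--     mid = len(str_val) // 2
--     z1, o1 = count01(str_val[:mid])
--     z2, o2 = count01(str_val[mid:])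
--     return z1 + z2, o1 + o2
-- ===== Notes on version B (the rewrite author's own statement) =====
-- stated objective: alternative
-- what changed: Replaces A's single linear pass with two accumulators by a divide-and-conquer recursion that splits the string in half, counts each half recursively, and adds the resulting pairs; correct because character counts are additive over concatenation.
import Mathlib
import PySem

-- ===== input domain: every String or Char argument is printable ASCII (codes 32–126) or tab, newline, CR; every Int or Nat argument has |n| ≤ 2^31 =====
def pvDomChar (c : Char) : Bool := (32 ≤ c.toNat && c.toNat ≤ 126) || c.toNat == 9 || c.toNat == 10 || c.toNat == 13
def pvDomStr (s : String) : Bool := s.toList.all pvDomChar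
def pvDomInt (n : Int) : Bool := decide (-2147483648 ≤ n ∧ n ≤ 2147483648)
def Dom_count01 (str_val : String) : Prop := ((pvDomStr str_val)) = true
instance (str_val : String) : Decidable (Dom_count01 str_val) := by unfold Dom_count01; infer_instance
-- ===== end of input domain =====

-- B replaces A's single accumulator pass by a divide-and-conquer recursion (split in half, count halves, add pairs); alternative structure, not faster.


-- ===== PORT A =====
-- zeros/ones accumulators, one pass over the characters, branch on c == '0'
def count01 (str_val : String) : Int × Int :=
  str_val.toList.foldl
    (fun (st : Int × Int) c => if c == '0' then (st.1 + 1, st.2) else (st.1, st.2 + 1))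
    (0, 0)

-- ===== PORT B =====
-- divide and conquer over the character list: base cases [] and [c], else split at len//2,
-- recurse on both halves (str_val[:mid] / str_val[mid:] = take/drop) and add the pairs
def count01Go (l : List Char) : Int × Int :=
  if h : l.length ≤ 1 then
    match l with
    | [] => (0, 0)
    | c :: _ => if c == '0' then (1, 0) else (0, 1)
  else
    let mid := l.length / 2
    let p := count01Go (l.take mid)
    let q := count01Go (l.drop mid)
    (p.1 + q.1, p.2 + q.2)
termination_by l.length
decreasing_by
  · simp only [List.length_take]; omega
  · simp only [List.length_drop]; omega

def count01_alt (str_val : String) : Int × Int := count01Go str_val.toList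

-- ===== PRECONDITION & SPEC =====
def Spec_count01 (str_val : String) (out : Int × Int) : Prop := out = count01_alt str_val
instance (str_val : String) (out : Int × Int) : Decidable (Spec_count01 str_val out) := by unfold Spec_count01; infer_instance

-- ===== CLAIM (what is proved, stated in full; the proofs are below) =====
def Claim_equal_count01 : Prop := ∀ (str_val : String), Dom_count01 str_val → Spec_count01 str_val (count01 str_val)

-- ===== LEMMAS AND PROOFS =====

-- A's loop computes (count of '0', length - count of '0').
theorem count01_loop (l : List Char) (z o : Int) :
    l.foldl (fun (st : Int × Int) c => if c == '0' then (st.1 + 1, st.2) else (st.1, st.2 + 1)) (z, o)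
      = (z + l.count '0', o + (l.length - l.count '0' : Int)) := by
  induction l generalizing z o with
  | nil => simp
  | cons h t ih =>
    simp only [List.foldl_cons]
    by_cases hc : h == '0'
    · have he : h = '0' := beq_iff_eq.mp hc
      rw [if_pos hc, ih]
      simp only [he, List.count_cons_self, List.length_cons]
      refine Prod.ext ?_ ?_ <;> simp <;> try ring
    · have hne : ¬ (h = '0') := fun e => hc (by simp [e])
      rw [if_neg hc, ih]
      simp only [List.count_cons_of_ne hne, List.length_cons]
      refine Prod.ext ?_ ?_ <;> simp <;> try ring

-- B's divide-and-conquer computes the same pair, by strong induction on length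
-- (counts are additive over the take/drop split).
theorem count01Go_eq (l : List Char) :
    count01Go l = ((l.count '0' : Int), (l.length : Int) - l.count '0') := by
  induction hn : l.length using Nat.strong_induction_on generalizing l with
  | _ n ih =>
    subst hn
    unfold count01Go
    by_cases h : l.length ≤ 1
    · rw [dif_pos h]
      match l, h with
      | [], _ => simp
      | [c], _ =>
        by_cases hc : c == '0'
        · have : c = '0' := beq_iff_eq.mp hc
          simp [this]
        · have : ¬ (c = '0') := fun e => hc (by simp [e])
          simp [this]
      | c₁ :: c₂ :: t, h => simp at h
    · rw [dif_neg h]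
      have hlen : 2 ≤ l.length := by omega
      have ht : (l.take (l.length / 2)).length < l.length := by
        simp only [List.length_take]; omega
      have hd : (l.drop (l.length / 2)).length < l.length := by
        simp only [List.length_drop]; omega
      simp only [ih _ ht _ rfl, ih _ hd _ rfl]
      have hcount : (l.take (l.length / 2)).count '0' + (l.drop (l.length / 2)).count '0'
          = l.count '0' := by
        conv_rhs => rw [← List.take_append_drop (l.length / 2) l]
        rw [List.count_append]
      have hlen2 : (l.take (l.length / 2)).length + (l.drop (l.length / 2)).length
          = l.length := by
        simp only [List.length_take, List.length_drop]; omega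
      refine Prod.ext ?_ ?_ <;> simp <;> omega

-- ===== VERDICT (by name: the statement is the Claim_ definition above) =====
theorem count01_spec : Claim_equal_count01 := by
  intro s _
  unfold Spec_count01 count01 count01_alt
  rw [count01_loop, count01Go_eq]
  refine Prod.ext ?_ ?_ <;> simp
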